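-- pv_equiv track=rewrite | github.com/parthchandak02/literature-review-assistant | src/screening/base_agent.py | validate_model_provider_compatibility
-- ===== SOURCE A (Python) =====
-- def validate_model_provider_compatibility(model: str, provider: str) -> bool:
--     """
--     Validate that a model name is compatible with the provider.
--
--     Args:
--         model: Model name
--         provider: LLM provider name
--
--     Returns:
--         True if compatible, False otherwise
--     """
--     provider_lower = provider.lower()
--     model_lower = model.lower()
--
--     # OpenAI models
--     if provider_lower == "openai":
--         return any(
--             model_lower.startswith(prefix)
--             for prefix in ["gpt-4", "gpt-3.5", "gpt-4o", "o1"]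
--         )
--
--     # Anthropic models
--     elif provider_lower == "anthropic":
--         return any(
--             model_lower.startswith(prefix)
--             for prefix in ["claude-3", "claude-2", "claude"]
--         )
--
--     # Gemini models
--     elif provider_lower == "gemini":
--         return any(
--             model_lower.startswith(prefix)
--             for prefix in ["gemini", "gemma"]
--         )
--
--     # Perplexity models
--     elif provider_lower == "perplexity":
--         return any(
--             model_lower.startswith(prefix)
--             for prefix in ["sonar", "llama", "mistral"]
--         )
--
--     # Unknown provider - allow but warn
--     return True
-- ===== SOURCE B (Python) =====
-- # Inverse lookup: infer the model's provider from its name prefix, then compare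
-- # with the claimed provider (unknown providers are always allowed).  Correct
-- # because the nine (minimal) prefixes are pairwise non-overlapping across
-- # providers, and A's redundant prefixes (gpt-4o, claude-3, claude-2) are
-- # subsumed by gpt-4 / claude.
-- _PROVIDER_OF_PREFIX = [
--     ("gpt-4", "openai"), ("gpt-3.5", "openai"), ("o1", "openai"),
--     ("claude", "anthropic"),
--     ("gemini", "gemini"), ("gemma", "gemini"),
--     ("sonar", "perplexity"), ("llama", "perplexity"), ("mistral", "perplexity"),
-- ]
-- _KNOWN_PROVIDERS = ("openai", "anthropic", "gemini", "perplexity")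
--
-- def validate_model_provider_compatibility(model: str, provider: str) -> bool:
--     provider_lower = provider.lower()
--     model_lower = model.lower()
--     if provider_lower not in _KNOWN_PROVIDERS:
--         return True  # unknown provider - allow
--     inferred = next((prov for pre, prov in _PROVIDER_OF_PREFIX
--                      if model_lower.startswith(pre)), None)
--     return inferred == provider_lower
-- ===== Notes on version B (the rewrite author's own statement) =====
-- stated objective: alternative
-- what changed: Inverts the lookup direction: instead of dispatching on the provider and testing its prefix list, B infers the model's provider from a minimal prefix-to-provider map (dropping A's redundant prefixes gpt-4o/claude-3/claude-2, subsumed by gpt-4/claude) and compares the inferred provider with the claimed one; unknown providers remain allowed.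
import Mathlib
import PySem

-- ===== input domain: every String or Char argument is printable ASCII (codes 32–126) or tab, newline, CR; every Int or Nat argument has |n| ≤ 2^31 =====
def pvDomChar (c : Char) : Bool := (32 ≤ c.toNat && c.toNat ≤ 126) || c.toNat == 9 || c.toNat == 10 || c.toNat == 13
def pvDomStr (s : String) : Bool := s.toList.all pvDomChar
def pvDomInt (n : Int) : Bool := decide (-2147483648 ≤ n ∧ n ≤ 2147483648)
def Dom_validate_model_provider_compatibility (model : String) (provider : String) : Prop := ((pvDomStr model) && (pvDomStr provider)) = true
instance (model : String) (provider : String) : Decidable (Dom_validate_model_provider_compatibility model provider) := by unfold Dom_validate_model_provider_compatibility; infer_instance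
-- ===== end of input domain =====

-- B inverts the lookup: it infers the model's provider from a minimal prefix-to-provider map and compares it with the claimed provider (unknown providers still allowed); alternative decomposition, same cost.
-- ===== PORT A =====
def validate_model_provider_compatibility (model : String) (provider : String) : Bool :=
  let provider_lower := PySem.Str.lower provider
  let model_lower := PySem.Str.lower model
  if provider_lower == "openai" then
    (["gpt-4", "gpt-3.5", "gpt-4o", "o1"] : List String).any (fun pre => PySem.Str.startswith model_lower pre)
  else if provider_lower == "anthropic" then
    (["claude-3", "claude-2", "claude"] : List String).any (fun pre => PySem.Str.startswith model_lower pre)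
  else if provider_lower == "gemini" then
    (["gemini", "gemma"] : List String).any (fun pre => PySem.Str.startswith model_lower pre)
  else if provider_lower == "perplexity" then
    (["sonar", "llama", "mistral"] : List String).any (fun pre => PySem.Str.startswith model_lower pre)
  else
    true

-- ===== PORT B =====
-- minimal prefix → provider map (port of Source B's _PROVIDER_OF_PREFIX)
def pvProviderOfPrefix : List (String × String) :=
  [("gpt-4", "openai"), ("gpt-3.5", "openai"), ("o1", "openai"),
   ("claude", "anthropic"),
   ("gemini", "gemini"), ("gemma", "gemini"),
   ("sonar", "perplexity"), ("llama", "perplexity"), ("mistral", "perplexity")]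

def pvKnownProviders : List String := ["openai", "anthropic", "gemini", "perplexity"]

def validate_model_provider_compatibility_alt (model : String) (provider : String) : Bool :=
  let provider_lower := PySem.Str.lower provider
  let model_lower := PySem.Str.lower model
  if !(pvKnownProviders.contains provider_lower) then
    true  -- unknown provider - allow
  else
    -- next((prov for pre, prov in map if model_lower.startswith(pre)), None) == provider_lower
    ((pvProviderOfPrefix.find? (fun pp => PySem.Str.startswith model_lower pp.1)).map Prod.snd)
      == some provider_lower

-- ===== PRECONDITION & SPEC =====
def Spec_validate_model_provider_compatibility (model : String) (provider : String) (out : Bool) : Prop := out = validate_model_provider_compatibility_alt model provider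
instance (model : String) (provider : String) (out : Bool) : Decidable (Spec_validate_model_provider_compatibility model provider out) := by unfold Spec_validate_model_provider_compatibility; infer_instance

-- ===== CLAIM (what is proved, stated in full; the proofs are below) =====
def Claim_equal_validate_model_provider_compatibility : Prop := ∀ (model : String) (provider : String), Dom_validate_model_provider_compatibility model provider → Spec_validate_model_provider_compatibility model provider (validate_model_provider_compatibility model provider)

-- ===== LEMMAS AND PROOFS =====

-- startswith is antitone in the prefix: if p is a prefix of q, startswith s q -> startswith s p
theorem pv_sw_mono (s p q : List Char) (h : p <+: q)
    (hq : PySem.Chars.startswith s q = true) : PySem.Chars.startswith s p = true := by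
  rw [PySem.Chars.startswith_iff] at hq ⊢
  exact h.trans hq

-- incomparable prefixes cannot both be prefixes of s
theorem pv_sw_disj (s p q : List Char) (h : ¬ p <+: q) (h' : ¬ q <+: p)
    (hp : PySem.Chars.startswith s p = true) : PySem.Chars.startswith s q = false := by
  rw [Bool.eq_false_iff]
  intro hq
  rw [PySem.Chars.startswith_iff] at hp hq
  rcases List.prefix_or_prefix_of_prefix hp hq with h1 | h1
  · exact h h1
  · exact h' h1

-- if every row of l mapped to x fails the predicate, the found row (if any) is not mapped to x
theorem pv_find_map_ne {α : Type} (l : List (α × String)) (f : α × String → Bool) (x : String)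
    (h : ∀ pp ∈ l, pp.2 = x → f pp = false) :
    (((l.find? f).map Prod.snd) == some x) = false := by
  cases hf : l.find? f with
  | none => simp
  | some pp =>
    have hmem := List.mem_of_find?_eq_some hf
    have hpred := List.find?_some hf
    have : pp.2 ≠ x := fun hx => by simp [h pp hmem hx] at hpred
    simp [this]

-- ===== VERDICT (by name: the statement is the Claim_ definition above) =====
set_option maxHeartbeats 2000000 in
theorem validate_model_provider_compatibility_spec : Claim_equal_validate_model_provider_compatibility := by
  intro model provider _
  unfold Spec_validate_model_provider_compatibility
  unfold validate_model_provider_compatibility validate_model_provider_compatibility_alt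
  set m := PySem.Str.lower model with hm
  set p := PySem.Str.lower provider with hp
  by_cases h1 : p = "openai"
  · by_cases s4 : PySem.Chars.startswith m.toList (['g','p','t','-','4'] : List Char) = true
    · simp [h1, pvKnownProviders, pvProviderOfPrefix, List.find?, s4]
    · rw [Bool.not_eq_true] at s4
      have s4o : PySem.Chars.startswith m.toList (['g','p','t','-','4','o'] : List Char) = false := by
        cases hq : PySem.Chars.startswith m.toList (['g','p','t','-','4','o'] : List Char)
        · rfl
        · exact absurd (pv_sw_mono m.toList ['g','p','t','-','4'] ['g','p','t','-','4','o'] (by decide) hq) (by simp [s4])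
      by_cases s35 : PySem.Chars.startswith m.toList (['g','p','t','-','3','.','5'] : List Char) = true
      · simp [h1, pvKnownProviders, pvProviderOfPrefix, List.find?, s4, s35]
      · rw [Bool.not_eq_true] at s35
        by_cases so1 : PySem.Chars.startswith m.toList (['o','1'] : List Char) = true
        · simp [h1, pvKnownProviders, pvProviderOfPrefix, List.find?, s4, s35, so1]
        · rw [Bool.not_eq_true] at so1
          have hne := pv_find_map_ne pvProviderOfPrefix
            (fun pp => PySem.Chars.startswith m.toList pp.1.toList) "openai"
            (by intro pp hpp heq; fin_cases hpp <;> first | simpa using s4 | simpa using s35 | simpa using so1 | simp at heq)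
          simp [h1, pvKnownProviders, s4, s35, s4o, so1, hne]
  · by_cases h2 : p = "anthropic"
    · by_cases sc : PySem.Chars.startswith m.toList (['c','l','a','u','d','e'] : List Char) = true
      · have d1 := pv_sw_disj m.toList (['c','l','a','u','d','e'] : List Char) (['g','p','t','-','4'] : List Char) (by decide) (by decide) sc
        have d2 := pv_sw_disj m.toList (['c','l','a','u','d','e'] : List Char) (['g','p','t','-','3','.','5'] : List Char) (by decide) (by decide) sc
        have d3 := pv_sw_disj m.toList (['c','l','a','u','d','e'] : List Char) (['o','1'] : List Char) (by decide) (by decide) sc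
        simp [h1, h2, pvKnownProviders, pvProviderOfPrefix, List.find?, sc, d1, d2, d3]
      · rw [Bool.not_eq_true] at sc
        have sc3 : PySem.Chars.startswith m.toList (['c','l','a','u','d','e','-','3'] : List Char) = false := by
          cases hq : PySem.Chars.startswith m.toList (['c','l','a','u','d','e','-','3'] : List Char)
          · rfl
          · exact absurd (pv_sw_mono m.toList ['c','l','a','u','d','e'] ['c','l','a','u','d','e','-','3'] (by decide) hq) (by simp [sc])
        have sc2 : PySem.Chars.startswith m.toList (['c','l','a','u','d','e','-','2'] : List Char) = false := by
          cases hq : PySem.Chars.startswith m.toList (['c','l','a','u','d','e','-','2'] : List Char)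
          · rfl
          · exact absurd (pv_sw_mono m.toList ['c','l','a','u','d','e'] ['c','l','a','u','d','e','-','2'] (by decide) hq) (by simp [sc])
        have hne := pv_find_map_ne pvProviderOfPrefix
          (fun pp => PySem.Chars.startswith m.toList pp.1.toList) "anthropic"
          (by intro pp hpp heq; fin_cases hpp <;> first | simpa using sc | simp at heq)
        simp [h1, h2, pvKnownProviders, sc, sc2, sc3, hne]
    · by_cases h3 : p = "gemini"
      · by_cases sg : PySem.Chars.startswith m.toList (['g','e','m','i','n','i'] : List Char) = true
        · have d1 := pv_sw_disj m.toList (['g','e','m','i','n','i'] : List Char) (['g','p','t','-','4'] : List Char) (by decide) (by decide) sg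
          have d2 := pv_sw_disj m.toList (['g','e','m','i','n','i'] : List Char) (['g','p','t','-','3','.','5'] : List Char) (by decide) (by decide) sg
          have d3 := pv_sw_disj m.toList (['g','e','m','i','n','i'] : List Char) (['o','1'] : List Char) (by decide) (by decide) sg
          have d4 := pv_sw_disj m.toList (['g','e','m','i','n','i'] : List Char) (['c','l','a','u','d','e'] : List Char) (by decide) (by decide) sg
          simp [h1, h2, h3, pvKnownProviders, pvProviderOfPrefix, List.find?, sg, d1, d2, d3, d4]
        · rw [Bool.not_eq_true] at sg
          by_cases sgm : PySem.Chars.startswith m.toList (['g','e','m','m','a'] : List Char) = true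
          · have d1 := pv_sw_disj m.toList (['g','e','m','m','a'] : List Char) (['g','p','t','-','4'] : List Char) (by decide) (by decide) sgm
            have d2 := pv_sw_disj m.toList (['g','e','m','m','a'] : List Char) (['g','p','t','-','3','.','5'] : List Char) (by decide) (by decide) sgm
            have d3 := pv_sw_disj m.toList (['g','e','m','m','a'] : List Char) (['o','1'] : List Char) (by decide) (by decide) sgm
            have d4 := pv_sw_disj m.toList (['g','e','m','m','a'] : List Char) (['c','l','a','u','d','e'] : List Char) (by decide) (by decide) sgm
            simp [h1, h2, h3, pvKnownProviders, pvProviderOfPrefix, List.find?, sg, sgm, d1, d2, d3, d4]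
          · rw [Bool.not_eq_true] at sgm
            have hne := pv_find_map_ne pvProviderOfPrefix
              (fun pp => PySem.Chars.startswith m.toList pp.1.toList) "gemini"
              (by intro pp hpp heq; fin_cases hpp <;> first | simpa using sg | simpa using sgm | simp at heq)
            simp [h1, h2, h3, pvKnownProviders, sg, sgm, hne]
      · by_cases h4 : p = "perplexity"
        · by_cases ss : PySem.Chars.startswith m.toList (['s','o','n','a','r'] : List Char) = true
          · have d1 := pv_sw_disj m.toList (['s','o','n','a','r'] : List Char) (['g','p','t','-','4'] : List Char) (by decide) (by decide) ss
            have d2 := pv_sw_disj m.toList (['s','o','n','a','r'] : List Char) (['g','p','t','-','3','.','5'] : List Char) (by decide) (by decide) ss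
            have d3 := pv_sw_disj m.toList (['s','o','n','a','r'] : List Char) (['o','1'] : List Char) (by decide) (by decide) ss
            have d4 := pv_sw_disj m.toList (['s','o','n','a','r'] : List Char) (['c','l','a','u','d','e'] : List Char) (by decide) (by decide) ss
            have d5 := pv_sw_disj m.toList (['s','o','n','a','r'] : List Char) (['g','e','m','i','n','i'] : List Char) (by decide) (by decide) ss
            have d6 := pv_sw_disj m.toList (['s','o','n','a','r'] : List Char) (['g','e','m','m','a'] : List Char) (by decide) (by decide) ss
            simp [h1, h2, h3, h4, pvKnownProviders, pvProviderOfPrefix, List.find?, ss, d1, d2, d3, d4, d5, d6]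
          · rw [Bool.not_eq_true] at ss
            by_cases sl : PySem.Chars.startswith m.toList (['l','l','a','m','a'] : List Char) = true
            · have d1 := pv_sw_disj m.toList (['l','l','a','m','a'] : List Char) (['g','p','t','-','4'] : List Char) (by decide) (by decide) sl
              have d2 := pv_sw_disj m.toList (['l','l','a','m','a'] : List Char) (['g','p','t','-','3','.','5'] : List Char) (by decide) (by decide) sl
              have d3 := pv_sw_disj m.toList (['l','l','a','m','a'] : List Char) (['o','1'] : List Char) (by decide) (by decide) sl
              have d4 := pv_sw_disj m.toList (['l','l','a','m','a'] : List Char) (['c','l','a','u','d','e'] : List Char) (by decide) (by decide) sl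
              have d5 := pv_sw_disj m.toList (['l','l','a','m','a'] : List Char) (['g','e','m','i','n','i'] : List Char) (by decide) (by decide) sl
              have d6 := pv_sw_disj m.toList (['l','l','a','m','a'] : List Char) (['g','e','m','m','a'] : List Char) (by decide) (by decide) sl
              simp [h1, h2, h3, h4, pvKnownProviders, pvProviderOfPrefix, List.find?, ss, sl, d1, d2, d3, d4, d5, d6]
            · rw [Bool.not_eq_true] at sl
              by_cases smi : PySem.Chars.startswith m.toList (['m','i','s','t','r','a','l'] : List Char) = true
              · have d1 := pv_sw_disj m.toList (['m','i','s','t','r','a','l'] : List Char) (['g','p','t','-','4'] : List Char) (by decide) (by decide) smi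
                have d2 := pv_sw_disj m.toList (['m','i','s','t','r','a','l'] : List Char) (['g','p','t','-','3','.','5'] : List Char) (by decide) (by decide) smi
                have d3 := pv_sw_disj m.toList (['m','i','s','t','r','a','l'] : List Char) (['o','1'] : List Char) (by decide) (by decide) smi
                have d4 := pv_sw_disj m.toList (['m','i','s','t','r','a','l'] : List Char) (['c','l','a','u','d','e'] : List Char) (by decide) (by decide) smi
                have d5 := pv_sw_disj m.toList (['m','i','s','t','r','a','l'] : List Char) (['g','e','m','i','n','i'] : List Char) (by decide) (by decide) smi
                have d6 := pv_sw_disj m.toList (['m','i','s','t','r','a','l'] : List Char) (['g','e','m','m','a'] : List Char) (by decide) (by decide) smi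
                simp [h1, h2, h3, h4, pvKnownProviders, pvProviderOfPrefix, List.find?, ss, sl, smi, d1, d2, d3, d4, d5, d6]
              · rw [Bool.not_eq_true] at smi
                have hne := pv_find_map_ne pvProviderOfPrefix
                  (fun pp => PySem.Chars.startswith m.toList pp.1.toList) "perplexity"
                  (by intro pp hpp heq; fin_cases hpp <;> first | simpa using ss | simpa using sl | simpa using smi | simp at heq)
                simp [h1, h2, h3, h4, pvKnownProviders, ss, sl, smi, hne]
        · simp [h1, h2, h3, h4, pvKnownProviders]
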